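-- pv_equiv track=rewrite | github.com/komajun365/competitive_programming | gcj/2021_qual/c.py | calc
-- ===== SOURCE A (Python) =====
-- def calc(n, c):
--     lim = n * (n+1)//2 -1
--     if c > lim or c < n-1:
--         return 'IMPOSSIBLE'
--
--     c -= n-1
--     res = [n]
--     for i in range(n-1,0,-1):
--         move = min(c, n-i)
--         res = res[:move][::-1] + [i] + res[move:]
--         c -= move
--     return ' '.join(map(str,res))
-- ===== SOURCE B (Python) =====
-- def calc(n, c):
--     lim = n * (n + 1) // 2 - 1
--     if c > lim or c < n - 1:
--         return 'IMPOSSIBLE'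
--     c -= n - 1
--     # current sequence = front[::-1] + [n] + back, read backwards if rev
--     front, back, rev = [], [], False
--     i = n - 1
--     while i >= 1 and c >= n - i:      # full-prefix reverse: flag toggle + append
--         c -= n - i
--         rev = not rev
--         if rev:
--             front.append(i)
--         else:
--             back.append(i)
--         i -= 1
--     lst = front[::-1] + [n] + back
--     if rev:
--         lst.reverse()
--     if i >= 1 and c > 0:              # at most one partial reverse
--         lst = lst[:c][::-1] + [i] + lst[c:]
--         i -= 1
--     lst = list(range(1, i + 1)) + lst  # remaining steps all prepend
--     return ' '.join(map(str, lst))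
-- ===== Notes on version B (the rewrite author's own statement) =====
-- stated objective: alternative
-- what changed: A rebuilds the whole list with a reversed-prefix splice on every iteration; B keeps the sequence as two append-only lists plus a direction flag, so a full-prefix reverse becomes a flag toggle and an append, with at most one materialised partial reverse and a closed-form prepend of the remaining values.
import Mathlib
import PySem

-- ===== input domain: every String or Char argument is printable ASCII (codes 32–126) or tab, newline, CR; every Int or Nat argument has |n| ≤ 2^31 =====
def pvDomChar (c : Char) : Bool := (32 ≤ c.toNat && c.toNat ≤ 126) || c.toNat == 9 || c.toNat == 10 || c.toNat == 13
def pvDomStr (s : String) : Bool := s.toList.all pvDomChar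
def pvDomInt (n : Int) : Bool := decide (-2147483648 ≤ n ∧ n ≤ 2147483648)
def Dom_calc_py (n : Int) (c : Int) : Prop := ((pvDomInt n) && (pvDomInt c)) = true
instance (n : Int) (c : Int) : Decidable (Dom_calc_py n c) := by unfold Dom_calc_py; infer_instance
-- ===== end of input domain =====

-- B replaces A's per-iteration reversed-prefix splice by a two-list deque with a direction
-- flag: full-prefix reverses become a flag toggle and an append, at most one partial reverse,
-- and a closed-form prepend of the remaining values.

-- ===== PORT A =====
-- loop body of A: res = res[:move][::-1] + [i] + res[move:]; c -= move   ([::-1] is reverse, PySem.List.slice?_none_none_neg_one)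
def stepA (n : Int) (st : List Int × Int) (i : Int) : List Int × Int :=
  let move := min st.2 (n - i)
  ((PySem.List.slice st.1 none (some move)).reverse ++ [i] ++ PySem.List.slice st.1 (some move) none,
   st.2 - move)

def calc_py (n : Int) (c : Int) : String :=
  let lim := PySem.Int.floordiv (n * (n + 1)) 2 - 1
  if c > lim ∨ c < n - 1 then "IMPOSSIBLE"
  else
    let c1 := c - (n - 1)
    let st := (PySem.List.pyRange (n - 1) 0 (-1)).foldl (stepA n) ([n], c1)
    PySem.Str.join " " (st.1.map PySem.Int.toStr)

-- ===== PORT B =====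
-- the while loop of Source B: i counts down; only i ≥ 1 is ever entered, so i is kept as a Nat
-- ((n-1).toNat below = Python's i = n-1 whenever the loop can run; for n ≤ 0 both skip the loop)
def altPhase1 (n : Int) : Nat → Int → List Int → List Int → Bool → Int × Nat × List Int × List Int × Bool
  | 0, c, f, b, rev => (c, 0, f, b, rev)
  | k + 1, c, f, b, rev =>
    if n - ((k : Int) + 1) ≤ c then
      let c' := c - (n - ((k : Int) + 1))
      let rev' := !rev
      if rev' then altPhase1 n k c' (f ++ [(k : Int) + 1]) b rev'
      else altPhase1 n k c' f (b ++ [(k : Int) + 1]) rev'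
    else (c, k + 1, f, b, rev)

-- the tail of Source B after the while loop (slices there have nonnegative bounds: take/drop)
def altFinish (n : Int) (st : Int × Nat × List Int × List Int × Bool) : List Int :=
  let (c1, i1, f, b, rev) := st
  let lst0 := f.reverse ++ [n] ++ b
  let lst1 := if rev then lst0.reverse else lst0
  let (lst2, i2) :=
    if 1 ≤ i1 ∧ 0 < c1 then
      ((lst1.take c1.toNat).reverse ++ [(i1 : Int)] ++ lst1.drop c1.toNat, i1 - 1)
    else (lst1, i1)
  PySem.List.pyRange 1 ((i2 : Int) + 1) 1 ++ lst2

def calc_py_alt (n : Int) (c : Int) : String :=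
  let lim := PySem.Int.floordiv (n * (n + 1)) 2 - 1
  if c > lim ∨ c < n - 1 then "IMPOSSIBLE"
  else
    let c1 := c - (n - 1)
    let lst := altFinish n (altPhase1 n (n - 1).toNat c1 [] [] false)
    PySem.Str.join " " (lst.map PySem.Int.toStr)

-- ===== PRECONDITION & SPEC =====
def Spec_calc_py (n : Int) (c : Int) (out : String) : Prop := out = calc_py_alt n c
instance (n : Int) (c : Int) (out : String) : Decidable (Spec_calc_py n c out) := by unfold Spec_calc_py; infer_instance

-- ===== CLAIM (what is proved, stated in full; the proofs are below) =====
def Claim_equal_calc_py : Prop := ∀ (n : Int) (c : Int), Dom_calc_py n c → Spec_calc_py n c (calc_py n c)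

-- ===== LEMMAS AND PROOFS =====

-- the sequence B's state (f, b, rev) represents
def seqOf (n : Int) (f b : List Int) (rev : Bool) : List Int :=
  if rev then (f.reverse ++ [n] ++ b).reverse else f.reverse ++ [n] ++ b

-- A's loop with c = 0 only prepends: it produces [1..k] ++ res
lemma foldA_zero (n : Int) : ∀ (k : Nat) (res : List Int), (k : Int) ≤ n - 1 →
    (PySem.List.pyRange (k : Int) 0 (-1)).foldl (stepA n) (res, 0)
      = (PySem.List.pyRange 1 ((k : Int) + 1) 1 ++ res, 0) := by
  intro k
  induction k with
  | zero =>
      intro res _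
      rw [Nat.cast_zero, PySem.List.pyRange_neg_one_eq_nil le_rfl,
        ]
      norm_num [PySem.List.pyRange_one_eq_nil (le_refl (1 : Int))]
  | succ k ih =>
      intro res hk
      have h1 : ((k : Int) + 1) ≤ n - 1 := by push_cast at hk; omega
      rw [PySem.List.pyRange_neg_one_cons (by omega)]
      push_cast
      rw [show ((k : Int) + 1 - 1) = (k : Int) from by ring]
      have hmove : min (0 : Int) (n - ((k : Int) + 1)) = 0 := by omega
      have hstep : stepA n (res, 0) ((k : Int) + 1) = (((k : Int) + 1) :: res, 0) := by
        simp [stepA, hmove, PySem.List.slice_to res (le_refl (0 : Int)),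
          PySem.List.slice_from res (le_refl (0 : Int))]
      rw [List.foldl_cons, hstep, ih (((k : Int) + 1) :: res) (by omega),
        PySem.List.pyRange_one_succ_right (by omega : (1 : Int) ≤ (k : Int) + 1)]
      simp

lemma length_seqOf (n : Int) (f b : List Int) (rev : Bool) :
    (seqOf n f b rev).length = f.length + 1 + b.length := by
  cases rev <;> simp [seqOf] <;> omega

-- main simulation: A's remaining loop from i = k equals B's phase-1 recursion plus its finish
lemma main_sim (n : Int) : ∀ (k : Nat) (cc : Int) (f b : List Int) (rev : Bool),
    0 ≤ cc → (k : Int) ≤ n - 1 →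
    ((f.length : Int) + 1 + (b.length : Int) = n - (k : Int)) →
    ((PySem.List.pyRange (k : Int) 0 (-1)).foldl (stepA n) (seqOf n f b rev, cc)).1
      = altFinish n (altPhase1 n k cc f b rev) := by
  intro k
  induction k with
  | zero =>
      intro cc f b rev _ _ _
      rw [Nat.cast_zero, PySem.List.pyRange_neg_one_eq_nil le_rfl]
      cases rev <;>
        norm_num [altPhase1, altFinish, seqOf, PySem.List.pyRange_one_eq_nil (le_refl (1 : Int))]
  | succ k ih =>
      intro cc f b rev hcc hk hlen
      have hk' : ((k : Int) + 1) ≤ n - 1 := by push_cast at hk; omega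
      have hlen' : (f.length : Int) + 1 + (b.length : Int) = n - ((k : Int) + 1) := by
        push_cast at hlen; omega
      have hm1 : (1 : Int) ≤ n - ((k : Int) + 1) := by omega
      rw [PySem.List.pyRange_neg_one_cons (by omega)]
      push_cast
      rw [show ((k : Int) + 1 - 1) = (k : Int) from by ring]
      rw [List.foldl_cons]
      by_cases hge : n - ((k : Int) + 1) ≤ cc
      · -- full reverse: flag toggle + append
        have hmove : min cc (n - ((k : Int) + 1)) = n - ((k : Int) + 1) := by omega
        have htoNat : (n - ((k : Int) + 1)).toNat = (seqOf n f b rev).length := by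
          rw [length_seqOf]; omega
        have hstep : stepA n (seqOf n f b rev, cc) ((k : Int) + 1)
            = ((seqOf n f b rev).reverse ++ [(k : Int) + 1], cc - (n - ((k : Int) + 1))) := by
          simp [stepA, hmove,
            PySem.List.slice_to (seqOf n f b rev) (by omega : (0 : Int) ≤ n - ((k : Int) + 1)),
            PySem.List.slice_from (seqOf n f b rev) (by omega : (0 : Int) ≤ n - ((k : Int) + 1)),
            htoNat]
        rw [hstep]
        have hrec : altPhase1 n (k + 1) cc f b rev
            = if (!rev) then
                altPhase1 n k (cc - (n - ((k : Int) + 1))) (f ++ [(k : Int) + 1]) b (!rev)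
              else altPhase1 n k (cc - (n - ((k : Int) + 1))) f (b ++ [(k : Int) + 1]) (!rev) := by
          simp [altPhase1, hge]
        rw [hrec]
        cases rev with
        | false =>
            have hseq : (seqOf n f b false).reverse ++ [(k : Int) + 1]
                = seqOf n (f ++ [(k : Int) + 1]) b true := by simp [seqOf]
            rw [hseq]
            simpa using ih (cc - (n - ((k : Int) + 1))) (f ++ [(k : Int) + 1]) b true
              (by omega) (by omega) (by simp only [List.length_append, List.length_cons, List.length_nil]; push_cast; omega)
        | true =>
            have hseq : (seqOf n f b true).reverse ++ [(k : Int) + 1]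
                = seqOf n f (b ++ [(k : Int) + 1]) false := by simp [seqOf]
            rw [hseq]
            simpa using ih (cc - (n - ((k : Int) + 1))) f (b ++ [(k : Int) + 1]) false
              (by omega) (by omega) (by simp only [List.length_append, List.length_cons, List.length_nil]; push_cast; omega)
      · -- phase 1 stops here
        have hstop : altPhase1 n (k + 1) cc f b rev = (cc, k + 1, f, b, rev) := by
          simp [altPhase1, hge]
        rw [hstop]
        have hlst1 : (if rev then (f.reverse ++ [n] ++ b).reverse else f.reverse ++ [n] ++ b)
            = seqOf n f b rev := by cases rev <;> simp [seqOf]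
        by_cases hc0 : 0 < cc
        · -- one partial reverse, then A only prepends
          have hmove : min cc (n - ((k : Int) + 1)) = cc := by omega
          have hstep : stepA n (seqOf n f b rev, cc) ((k : Int) + 1)
              = (((seqOf n f b rev).take cc.toNat).reverse ++ [(k : Int) + 1]
                  ++ (seqOf n f b rev).drop cc.toNat, 0) := by
            simp [stepA, hmove, PySem.List.slice_to (seqOf n f b rev) hcc,
              PySem.List.slice_from (seqOf n f b rev) hcc]
          rw [hstep, foldA_zero n k _ (by omega)]
          simp only [altFinish, hlst1]
          rw [if_pos ⟨by omega, hc0⟩]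
          push_cast
          simp
        · -- cc = 0: A's whole remaining loop prepends
          have hcc0 : cc = 0 := by omega
          subst hcc0
          have hmove : min (0 : Int) (n - ((k : Int) + 1)) = 0 := by omega
          have hstep : stepA n (seqOf n f b rev, 0) ((k : Int) + 1)
              = (((k : Int) + 1) :: seqOf n f b rev, 0) := by
            simp [stepA, hmove, PySem.List.slice_to (seqOf n f b rev) (le_refl (0 : Int)),
              PySem.List.slice_from (seqOf n f b rev) (le_refl (0 : Int))]
          rw [hstep, foldA_zero n k _ (by omega)]
          simp only [altFinish, hlst1]
          rw [if_neg (by simp)]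
          push_cast
          rw [PySem.List.pyRange_one_succ_right (by omega : (1 : Int) ≤ (k : Int) + 1)]
          simp

-- ===== VERDICT (by name: the statement is the Claim_ definition above) =====
theorem calc_py_spec : Claim_equal_calc_py := by
  intro n c _
  unfold Spec_calc_py calc_py calc_py_alt
  by_cases h : c > PySem.Int.floordiv (n * (n + 1)) 2 - 1 ∨ c < n - 1
  · simp only [h, if_true]
  · simp only [h, if_false]
    have hcge : n - 1 ≤ c := by omega
    by_cases hn : 1 ≤ n
    · have hk : (((n - 1).toNat : Int)) = n - 1 := by omega
      have := main_sim n (n - 1).toNat (c - (n - 1)) [] [] false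
        (by omega) (by omega) (by simp only [List.length_nil, Nat.cast_zero, hk]; omega)
      rw [hk] at this
      simp only [seqOf, Bool.false_eq_true, if_false, List.reverse_nil, List.nil_append,
        List.append_nil] at this
      rw [this]
    · have h0 : (n - 1).toNat = 0 := by omega
      rw [h0, PySem.List.pyRange_neg_one_eq_nil (by omega : n - 1 ≤ 0)]
      simp [altPhase1, altFinish, PySem.List.pyRange_one_eq_nil (le_refl (1 : Int))]
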